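-- pv_equiv track=rewrite | github.com/gbrahmam/DSA-practise | floor_expression.py | sumofproduct
-- ===== SOURCE A (Python) =====
-- def sumofproduct(n):
--     # Code here
--     add = 0
--     y=0
--     for i in range(1,n+1):
--         prod = 1
--         y = n//i
--         prod*=(i*y)
--         add+=prod
--     return add
-- ===== SOURCE B (Python) =====
-- def sumofproduct(n):
--     # divisor-block decomposition: floor(n/i) is constant on blocks [i, n//(n//i)];
--     # sum i*q over each block via the arithmetic-series formula -> O(sqrt n)
--     total = 0
--     i = 1
--     while i <= n:
--         q = n // i
--         j = n // q
--         total += q * (i + j) * (j - i + 1) // 2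
--         i = j + 1
--     return total
-- ===== Notes on version B (the rewrite author's own statement) =====
-- stated objective: faster
-- what changed: replaces the O(n) per-index loop by divisor-block decomposition: floor(n/i) is constant on each block [i, n//(n//i)], so each block contributes q times an arithmetic series, giving O(sqrt n) iterations
import Mathlib
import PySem

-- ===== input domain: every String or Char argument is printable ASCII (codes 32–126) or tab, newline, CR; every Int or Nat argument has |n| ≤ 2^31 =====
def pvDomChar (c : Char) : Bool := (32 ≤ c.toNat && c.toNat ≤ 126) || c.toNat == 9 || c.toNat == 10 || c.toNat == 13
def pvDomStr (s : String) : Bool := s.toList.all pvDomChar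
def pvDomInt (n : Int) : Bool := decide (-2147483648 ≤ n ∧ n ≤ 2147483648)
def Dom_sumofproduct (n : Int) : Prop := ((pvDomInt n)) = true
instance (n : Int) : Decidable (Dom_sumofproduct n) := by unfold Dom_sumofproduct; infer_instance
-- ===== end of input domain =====

-- B replaces A's O(n) loop by divisor-block decomposition (O(sqrt n) iterations); same value for every n.

-- ===== PORT A =====
def sumofproduct (n : Int) : Int :=
  let add : Int := 0
  let y : Int := 0
  let s := (PySem.List.pyRange 1 (n + 1) 1).foldl
    (fun (s : Int × Int) (i : Int) =>
      let prod : Int := 1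
      let y := PySem.Int.floordiv n i
      let prod := prod * (i * y)
      (s.1 + prod, y)) (add, y)
  s.1

-- ===== PORT B =====
-- the while loop of Source B as structural recursion on a fuel counter; fuel n.toNat is enough
-- because the loop index strictly increases each iteration (proved in pv_main below)
def sumBlocks (n : Int) : Nat → Int → Int
  | 0, _ => 0
  | (m + 1), i =>
    if i ≤ n then
      let q := PySem.Int.floordiv n i
      let j := PySem.Int.floordiv n q
      PySem.Int.floordiv (q * (i + j) * (j - i + 1)) 2 + sumBlocks n m (j + 1)
    else 0

def sumofproduct_alt (n : Int) : Int := sumBlocks n n.toNat 1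

-- ===== PRECONDITION & SPEC =====
def Spec_sumofproduct (n : Int) (out : Int) : Prop := out = sumofproduct_alt n
instance (n : Int) (out : Int) : Decidable (Spec_sumofproduct n out) := by unfold Spec_sumofproduct; infer_instance

-- ===== CLAIM (what is proved, stated in full; the proofs are below) =====
def Claim_equal_sumofproduct : Prop := ∀ (n : Int), Dom_sumofproduct n → Spec_sumofproduct n (sumofproduct n)

-- ===== LEMMAS AND PROOFS =====
-- the loop index strictly increases: i ≤ n//(n//i) when 1 ≤ i ≤ n
lemma pv_le_fd_fd {n i : Int} (h1 : 1 ≤ i) (h2 : i ≤ n) :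
    i ≤ PySem.Int.floordiv n (PySem.Int.floordiv n i) := by
  have hi : (0:Int) < i := by omega
  have hq1 : 1 ≤ PySem.Int.floordiv n i :=
    (PySem.Int.le_floordiv_iff_mul_le hi).mpr (by omega)
  have hqi : PySem.Int.floordiv n i * i ≤ n :=
    (PySem.Int.le_floordiv_iff_mul_le hi).mp le_rfl
  exact (PySem.Int.le_floordiv_iff_mul_le (by omega)).mpr (by nlinarith)


-- floor(n/k) is constant on the block [i, n//(n//i)]
lemma pv_fd_const {n i k : Int} (h1 : 1 ≤ i) (h2 : i ≤ n) (hik : i ≤ k)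
    (hkj : k ≤ PySem.Int.floordiv n (PySem.Int.floordiv n i)) :
    PySem.Int.floordiv n k = PySem.Int.floordiv n i := by
  have hi : (0:Int) < i := by omega
  have hk : (0:Int) < k := by omega
  have hq1 : 1 ≤ PySem.Int.floordiv n i :=
    (PySem.Int.le_floordiv_iff_mul_le hi).mpr (by omega)
  have hge : PySem.Int.floordiv n i ≤ PySem.Int.floordiv n k := by
    apply (PySem.Int.le_floordiv_iff_mul_le hk).mpr
    have := (PySem.Int.le_floordiv_iff_mul_le (by omega : (0:Int) < PySem.Int.floordiv n i)).mp hkj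
    nlinarith
  have hlt : PySem.Int.floordiv n k < PySem.Int.floordiv n i + 1 := by
    apply (PySem.Int.floordiv_lt_iff_lt_mul hk).mpr
    have h1' : n < (PySem.Int.floordiv n i + 1) * i :=
      (PySem.Int.floordiv_lt_iff_lt_mul hi).mp (by omega)
    nlinarith
  omega

-- twice the sum of consecutive integers a..b
lemma pv_two_mul_sum_pyRange : ∀ (m : Nat) (a b : Int), (b + 1 - a).toNat = m → a ≤ b + 1 →
    2 * (PySem.List.pyRange a (b + 1) 1).sum = (a + b) * (b - a + 1)
  | 0, a, b, hm, hab => by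
    have ha : a = b + 1 := by omega
    rw [PySem.List.pyRange_one_eq_nil (by omega)]
    have hz : (a + b) * (b - a + 1) = 0 := by rw [ha]; ring
    simp [hz]
  | (m + 1), a, b, hm, hab => by
    have hlt : a < b + 1 := by omega
    rw [PySem.List.pyRange_one_cons hlt]
    have ih := pv_two_mul_sum_pyRange m (a + 1) b (by omega) (by omega)
    simp only [List.sum_cons]
    linear_combination ih

-- value of one block
lemma pv_block_sum (n i j q : Int) (hij : i ≤ j)
    (hconst : ∀ k, i ≤ k → k ≤ j → PySem.Int.floordiv n k = q) :
    ((PySem.List.pyRange i (j + 1) 1).map (fun k => k * PySem.Int.floordiv n k)).sum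
      = PySem.Int.floordiv (q * (i + j) * (j - i + 1)) 2 := by
  have hmap : (PySem.List.pyRange i (j + 1) 1).map (fun k => k * PySem.Int.floordiv n k)
      = (PySem.List.pyRange i (j + 1) 1).map (fun k => k * q) := by
    apply List.map_congr_left
    intro k hk
    rw [PySem.List.mem_pyRange_one] at hk
    rw [hconst k hk.1 (by omega)]
  have hsum : 2 * (PySem.List.pyRange i (j + 1) 1).sum = (i + j) * (j - i + 1) :=
    pv_two_mul_sum_pyRange (j + 1 - i).toNat i j rfl (by omega)
  have hS : ((PySem.List.pyRange i (j + 1) 1).map (fun k => k * q)).sum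
      = (PySem.List.pyRange i (j + 1) 1).sum * q := by
    induction PySem.List.pyRange i (j + 1) 1 with
    | nil => simp
    | cons x xs ih => simp [ih]; ring
  rw [hmap, hS, PySem.Int.floordiv_eq_ediv_of_pos (by omega : (0:Int) < 2)]
  have h2 : q * (i + j) * (j - i + 1) = 2 * ((PySem.List.pyRange i (j + 1) 1).sum * q) := by
    linear_combination -q * hsum
  rw [h2, Int.mul_ediv_cancel_left _ (by norm_num)]

-- the block loop computes the full sum from i to n, given enough fuel
lemma pv_main (n : Int) : ∀ (m : Nat) (i : Int), (n + 1 - i).toNat ≤ m → 1 ≤ i →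
    sumBlocks n m i = ((PySem.List.pyRange i (n + 1) 1).map (fun k => k * PySem.Int.floordiv n k)).sum := by
  intro m
  induction m with
  | zero =>
    intro i hm h1
    rw [PySem.List.pyRange_one_eq_nil (by omega)]
    simp [sumBlocks]
  | succ m ih =>
    intro i hm h1
    by_cases hin : i ≤ n
    · rw [sumBlocks, if_pos hin]
      dsimp only
      have hq1 : 1 ≤ PySem.Int.floordiv n i :=
        (PySem.Int.le_floordiv_iff_mul_le (by omega)).mpr (by omega)
      have hij : i ≤ PySem.Int.floordiv n (PySem.Int.floordiv n i) := pv_le_fd_fd h1 hin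
      have hjn : PySem.Int.floordiv n (PySem.Int.floordiv n i) ≤ n := by
        have : PySem.Int.floordiv n (PySem.Int.floordiv n i) < n + 1 := by
          apply (PySem.Int.floordiv_lt_iff_lt_mul (by omega)).mpr
          nlinarith
        omega
      rw [PySem.List.pyRange_one_append i (PySem.Int.floordiv n (PySem.Int.floordiv n i) + 1) (n + 1)
            (by omega) (by omega), List.map_append, List.sum_append]
      rw [pv_block_sum n i (PySem.Int.floordiv n (PySem.Int.floordiv n i)) (PySem.Int.floordiv n i)
            hij (fun k hik hkj => pv_fd_const h1 hin hik hkj)]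
      rw [ih (PySem.Int.floordiv n (PySem.Int.floordiv n i) + 1) (by omega) (by omega)]
    · rw [sumBlocks, if_neg hin, PySem.List.pyRange_one_eq_nil (by omega)]
      simp

-- A's fold computes the same sum
lemma pv_foldA (n : Int) : ∀ (l : List Int) (acc y : Int),
    (l.foldl (fun (s : Int × Int) (i : Int) =>
       (s.1 + 1 * (i * PySem.Int.floordiv n i), PySem.Int.floordiv n i)) (acc, y)).1
    = acc + (l.map (fun k => k * PySem.Int.floordiv n k)).sum := by
  intro l
  induction l with
  | nil => simp
  | cons x xs ih =>
    intro acc y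
    rw [List.foldl_cons]
    dsimp only
    rw [ih]
    simp only [List.map_cons, List.sum_cons]
    ring

-- ===== VERDICT (by name: the statement is the Claim_ definition above) =====
theorem sumofproduct_spec : Claim_equal_sumofproduct := by
  intro n _
  unfold Spec_sumofproduct sumofproduct_alt sumofproduct
  have hA := pv_foldA n (PySem.List.pyRange 1 (n + 1) 1) 0 0
  have hB := pv_main n n.toNat 1 (by omega) (by omega)
  simp only [] at *
  rw [hB]
  exact hA.trans (by rw [zero_add])
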